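-- pv_equiv track=rewrite | github.com/dungsnowaxe/prometheus-red-team-bot | promptheus/scanner/pr_review_merge.py | attempts_show_pr_disagreement
-- ===== SOURCE A (Python) =====
-- def attempts_show_pr_disagreement(attempt_counts: list[int]) -> bool:
--     """Return True when attempt outcomes are inconsistent enough to require verification."""
--     if len(attempt_counts) < 2:
--         return False
--     if not any(count > 0 for count in attempt_counts):
--         return False
--     if any(count == 0 for count in attempt_counts):
--         return True
--     return len(set(attempt_counts)) > 1
-- ===== SOURCE B (Python) =====
-- def attempts_show_pr_disagreement(attempt_counts: list[int]) -> bool: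
--     """Return True when attempt outcomes are inconsistent enough to require verification."""
--     if len(attempt_counts) < 2:
--         return False
--     head = attempt_counts[0]
--     has_positive = False
--     differs_from_head = False
--     for count in attempt_counts:
--         if count > 0:
--             has_positive = True
--         if count != head:
--             differs_from_head = True
--         if has_positive and differs_from_head:
--             return True
--     return False
-- ===== Notes on version B (the rewrite author's own statement) =====
-- stated objective: alternative
-- what changed: Replaces A's staged passes (two any() scans, a zero-branch and a set build for distinctness) by one fused pass with two monotone accumulator flags (has_positive, differs-from-first-element) and an early exit once both hold; correct because with a positive present, 'some zero or distinct values' is exactly 'some element differs from the first'.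
import Mathlib
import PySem

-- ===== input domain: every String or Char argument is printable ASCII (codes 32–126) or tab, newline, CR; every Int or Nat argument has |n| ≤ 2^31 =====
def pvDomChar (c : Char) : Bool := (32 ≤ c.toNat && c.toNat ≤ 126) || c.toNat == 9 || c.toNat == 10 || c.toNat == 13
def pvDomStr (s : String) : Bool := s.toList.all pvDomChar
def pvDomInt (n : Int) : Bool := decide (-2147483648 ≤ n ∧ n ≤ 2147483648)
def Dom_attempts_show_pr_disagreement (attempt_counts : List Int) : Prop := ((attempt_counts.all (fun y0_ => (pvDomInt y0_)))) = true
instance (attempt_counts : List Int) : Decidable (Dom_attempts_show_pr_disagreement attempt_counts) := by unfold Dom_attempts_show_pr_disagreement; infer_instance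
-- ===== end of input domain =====

-- B replaces A's staged passes (two any() scans, a zero-branch, a set build) by one fused
-- pass with two accumulator flags (has_positive, differs-from-first) and an early exit
-- (objective: alternative decomposition; the early exit measured a constant-factor speedup).

-- ===== PORT A =====
def attempts_show_pr_disagreement (attempt_counts : List Int) : Bool :=
  if attempt_counts.length < 2 then false
  else if !(attempt_counts.any (fun count => decide (count > 0))) then false
  else if attempt_counts.any (fun count => decide (count = 0)) then true
  else decide ((PySem.Set.ofList attempt_counts).length > 1)

-- ===== PORT B =====
-- the fused loop of Source B: flags updated per element, early return when both hold
def pvScan_alt (head : Int) : List Int → Bool → Bool → Bool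
  | [], _, _ => false
  | count :: rest, hasPos, differs =>
    let hasPos := if decide (count > 0) then true else hasPos
    let differs := if decide (count ≠ head) then true else differs
    if hasPos && differs then true else pvScan_alt head rest hasPos differs

def attempts_show_pr_disagreement_alt (attempt_counts : List Int) : Bool :=
  if attempt_counts.length < 2 then false
  else
    match attempt_counts with
    | [] => false
    | head :: _ => pvScan_alt head attempt_counts false false

-- ===== PRECONDITION & SPEC =====
def Spec_attempts_show_pr_disagreement (attempt_counts : List Int) (out : Bool) : Prop := out = attempts_show_pr_disagreement_alt attempt_counts
instance (attempt_counts : List Int) (out : Bool) : Decidable (Spec_attempts_show_pr_disagreement attempt_counts out) := by unfold Spec_attempts_show_pr_disagreement; infer_instance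

-- ===== CLAIM (what is proved, stated in full; the proofs are below) =====
def Claim_equal_attempts_show_pr_disagreement : Prop := ∀ (attempt_counts : List Int), Dom_attempts_show_pr_disagreement attempt_counts → Spec_attempts_show_pr_disagreement attempt_counts (attempts_show_pr_disagreement attempt_counts)

-- ===== LEMMAS AND PROOFS =====

-- the early-exit scan over a nonempty list computes the conjunction of the two monotone flags
theorem pvScan_alt_eq (head : Int) (l : List Int) (hp df : Bool) (hl : l ≠ []) :
    pvScan_alt head l hp df =
      ((hp || l.any (fun c => decide (c > 0))) && (df || l.any (fun c => decide (c ≠ head)))) := by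
  induction l generalizing hp df with
  | nil => exact absurd rfl hl
  | cons c rest ih =>
    simp only [pvScan_alt, List.any_cons]
    cases hp <;> cases df <;> by_cases h1 : (0:Int) < c <;> by_cases h2 : c = head <;>
      · by_cases hrest : rest = []
        · subst hrest; simp [pvScan_alt, h1, h2]
        · simp [h1, h2, ih _ _ hrest]

-- a Nodup list with two distinct members has length ≥ 2
theorem pv_two_le_length_of_ne {l : List Int} {a b : Int}
    (ha : a ∈ l) (hb : b ∈ l) (hne : a ≠ b) : 2 ≤ l.length := by
  match l with
  | [] => cases ha
  | [x] =>
    simp only [List.mem_singleton] at ha hb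
    exact absurd (ha.trans hb.symm) hne
  | x :: y :: t => simp only [List.length_cons]; omega

-- all members equal M and Nodup ⇒ length ≤ 1
theorem pv_length_le_one_of_all_eq {l : List Int} {M : Int}
    (hnd : l.Nodup) (hall : ∀ x ∈ l, x = M) : l.length ≤ 1 := by
  match l with
  | [] => simp
  | [x] => simp
  | x :: y :: t =>
    have hx : x = M := hall x (by simp)
    have hy : y = M := hall y (by simp)
    have : x ≠ y := (List.nodup_cons.mp hnd).1 ∘ (by intro h; simp [h])
    exact absurd (hx.trans hy.symm) this

-- ===== VERDICT (by name: the statement is the Claim_ definition above) =====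
theorem attempts_show_pr_disagreement_spec : Claim_equal_attempts_show_pr_disagreement := by
  intro xs _
  show attempts_show_pr_disagreement xs = attempts_show_pr_disagreement_alt xs
  unfold attempts_show_pr_disagreement attempts_show_pr_disagreement_alt
  by_cases hlen : xs.length < 2
  · simp [hlen]
  · obtain ⟨x, y, t, rfl⟩ : ∃ x y t, xs = x :: y :: t := by
      match xs with
      | [] => simp at hlen
      | [a] => simp at hlen
      | a :: b :: t => exact ⟨a, b, t, rfl⟩
    simp only [if_neg hlen]
    rw [pvScan_alt_eq x (x :: y :: t) false false (by simp), Bool.false_or, Bool.false_or]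
    set l := x :: y :: t with hl
    by_cases hpos : ∃ c ∈ l, 0 < c
    · have hanyp : l.any (fun c => decide (c > 0)) = true := by
        simp only [List.any_eq_true, decide_eq_true_eq]
        obtain ⟨c, hc, hc0⟩ := hpos
        exact ⟨c, hc, hc0⟩
      simp only [hanyp, Bool.not_true, Bool.false_eq_true, if_false, Bool.true_and]
      by_cases hzero : ∃ c ∈ l, c = 0
      · have hz : l.any (fun c => decide (c = 0)) = true := by
          simp only [List.any_eq_true, decide_eq_true_eq]
          exact hzero
        have hne : ∃ c ∈ l, c ≠ x := by
          obtain ⟨c, hc, hc0⟩ := hzero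
          obtain ⟨p, hp, hp0⟩ := hpos
          by_cases hx0 : x = 0
          · exact ⟨p, hp, by omega⟩
          · exact ⟨c, hc, by omega⟩
        have hne' : l.any (fun c => decide (c ≠ x)) = true := by
          simp only [List.any_eq_true, decide_eq_true_eq]
          exact hne
        simp [hz]; exact hne
      · have hz : l.any (fun c => decide (c = 0)) = false := by
          rw [List.any_eq_false]; intro c hc
          exact fun h => hzero ⟨c, hc, of_decide_eq_true h⟩
        simp only [hz, Bool.false_eq_true, if_false]
        have hset : (1 < (PySem.Set.ofList l).length) ↔ (∃ c ∈ l, c ≠ x) := by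
          constructor
          · intro hgt
            by_contra hno
            push_neg at hno
            have hall : ∀ z ∈ PySem.Set.ofList l, z = x := fun z hz' =>
              hno z ((PySem.Set.mem_ofList l z).mp hz')
            have := pv_length_le_one_of_all_eq (PySem.Set.nodup_ofList l) hall
            omega
          · rintro ⟨c, hc, hcx⟩
            have := pv_two_le_length_of_ne
              ((PySem.Set.mem_ofList l c).mpr hc)
              ((PySem.Set.mem_ofList l x).mpr (by simp [hl])) hcx
            omega
        by_cases hP : ∃ c ∈ l, c ≠ x
        · have h1 : l.any (fun c => decide (c ≠ x)) = true := by
            simp only [List.any_eq_true, decide_eq_true_eq]; exact hP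
          simp [hset.mpr hP]; exact hP
        · have h1 : l.any (fun c => decide (c ≠ x)) = false := by
            rw [List.any_eq_false]; intro c hc
            exact fun h => hP ⟨c, hc, of_decide_eq_true h⟩
          have h2 : ¬ (1 < (PySem.Set.ofList l).length) := fun h => hP (hset.mp h)
          simp [h2]; intro c hc; by_contra h; exact hP ⟨c, hc, h⟩
    · have hanyp : l.any (fun c => decide (c > 0)) = false := by
        rw [List.any_eq_false]; intro c hc
        exact fun h => hpos ⟨c, hc, of_decide_eq_true h⟩
      simp [hanyp]
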